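-- pv_equiv track=rewrite | github.com/LvanArkel/aoc | 2019/Python/day4.py | adjacent2
-- ===== SOURCE A (Python) =====
-- def adjacent2(text):
--     if len(text) < 2:
--         return False
--     if text[0] == text[1]:
--         if len(text) == 2:
--             return True
--         if text[0] == text[2]:
--             digit = text[0]
--             while text[0] == digit:
--                 text = text[1:]
--                 if len(text) == 0:
--                     return False
--             return adjacent2(text)
--         return True
--     return adjacent2(text[1:])
-- ===== SOURCE B (Python) =====
-- def adjacent2(text):
--     if not text:
--         return False
--     prev = text[0]
--     count = 1
--     for ch in text[1:]:
--         if ch == prev: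
--             count += 1
--         elif count == 2:
--             return True
--         else:
--             prev = ch
--             count = 1
--     return count == 2
-- ===== Notes on version B (the rewrite author's own statement) =====
-- stated objective: faster
-- what changed: Replaced A's recursion with repeated string slicing and an inner strip-the-run while loop (quadratic copying) by a single left-to-right run-length scan that returns True as soon as a run of length exactly 2 closes.
import Mathlib
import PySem

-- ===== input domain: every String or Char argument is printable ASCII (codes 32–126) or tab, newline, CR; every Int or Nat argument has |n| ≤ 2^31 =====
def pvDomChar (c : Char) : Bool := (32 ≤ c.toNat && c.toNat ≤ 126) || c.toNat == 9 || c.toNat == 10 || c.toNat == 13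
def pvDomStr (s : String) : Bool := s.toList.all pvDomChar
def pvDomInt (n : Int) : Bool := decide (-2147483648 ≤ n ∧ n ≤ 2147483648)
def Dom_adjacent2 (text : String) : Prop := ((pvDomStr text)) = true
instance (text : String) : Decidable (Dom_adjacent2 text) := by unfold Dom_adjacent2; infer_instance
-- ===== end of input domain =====

-- B replaces A's recursion with repeated slicing plus an inner strip-the-run loop by a single linear run-length scan; objective: faster.

-- ===== PORT A =====
-- the inner `while text[0] == digit: text = text[1:]; if len(text) == 0: return False` loop:
-- none when the text is exhausted (Python returns False), some of the remaining text otherwise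
def pvStripA (d : Char) : List Char → Option (List Char)
  | [] => some []
  | c :: r =>
    if c == d then
      (match r with
       | [] => none
       | _ :: _ => pvStripA d r)
    else some (c :: r)

-- needed by adjacent2's termination proof
theorem pvStripA_length (d : Char) : ∀ (l t : List Char), pvStripA d l = some t → t.length ≤ l.length := by
  intro l
  induction l with
  | nil => intro t h; simp [pvStripA] at h; simp [← h]
  | cons c r ih =>
    intro t h
    simp only [pvStripA] at h
    split at h
    · cases r with
      | nil => simp at h
      | cons x xs =>
        have := ih t h
        simp only [List.length_cons] at this ⊢
        omega
    · rw [Option.some_inj] at h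
      simp [← h]

theorem pvStripA_cons_self (d x : Char) (xs : List Char) :
    pvStripA d (d :: x :: xs) = pvStripA d (x :: xs) := by
  simp [pvStripA]

def pvAdjA : List Char → Bool
  | [] => false
  | [_] => false
  | [a, b] => a == b
  | a :: b :: c :: rest =>
    if a == b then
      if a == c then
        match h : pvStripA a (a :: b :: c :: rest) with
        | none => false
        | some t => pvAdjA t
      else true
    else pvAdjA (b :: c :: rest)
termination_by l => l.length
decreasing_by
  · rw [pvStripA_cons_self] at h
    have := pvStripA_length a _ _ h
    simp only [List.length_cons] at this ⊢
    omega
  · simp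

def adjacent2 (text : String) : Bool := pvAdjA text.toList

-- ===== PORT B =====
-- single pass, run-length counting; `true` as soon as a run closes with length exactly 2
def pvScanB (prev : Char) (count : Int) : List Char → Bool
  | [] => count == 2
  | c :: r =>
    if c == prev then pvScanB prev (count + 1) r
    else if count == 2 then true
    else pvScanB c 1 r

def adjacent2_alt (text : String) : Bool :=
  match text.toList with
  | [] => false
  | c :: r => pvScanB c 1 r

-- ===== PRECONDITION & SPEC =====
def Spec_adjacent2 (text : String) (out : Bool) : Prop := out = adjacent2_alt text
instance (text : String) (out : Bool) : Decidable (Spec_adjacent2 text out) := by unfold Spec_adjacent2; infer_instance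

-- ===== CLAIM (what is proved, stated in full; the proofs are below) =====
def Claim_equal_adjacent2 : Prop := ∀ (text : String), Dom_adjacent2 text → Spec_adjacent2 text (adjacent2 text)

-- ===== LEMMAS AND PROOFS =====

def pvAdjB : List Char → Bool
  | [] => false
  | c :: r => pvScanB c 1 r

theorem pvStripA_dropWhile (d : Char) :
    ∀ (l : List Char), l ≠ [] →
      pvStripA d l = (match l.dropWhile (fun c => c == d) with
                      | [] => none
                      | t => some t) := by
  intro l
  induction l with
  | nil => intro h; simp at h
  | cons c r ih =>
    intro _
    by_cases hc : c = d
    · subst hc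
      cases r with
      | nil => simp [pvStripA, List.dropWhile]
      | cons x xs =>
        rw [pvStripA_cons_self, ih (by simp)]
        simp [List.dropWhile]
    · have hne : (c == d) = false := by simp [hc]
      simp [pvStripA, List.dropWhile, hne]

theorem pvScanB_big (a : Char) :
    ∀ (rest : List Char) (k : Int), 3 ≤ k →
      pvScanB a k rest = (match rest.dropWhile (fun c => c == a) with
                          | [] => false
                          | d :: r => pvScanB d 1 r) := by
  intro rest
  induction rest with
  | nil =>
    intro k hk
    have : (k == 2) = false := by simp; omega
    simp [pvScanB, List.dropWhile, this]
  | cons c r ih =>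
    intro k hk
    by_cases hc : c = a
    · subst hc
      simp only [pvScanB, beq_self_eq_true, if_true, List.dropWhile]
      rw [ih (k + 1) (by omega)]
    · have hne : (c == a) = false := by simp [hc]
      have hk2 : (k == 2) = false := by simp; omega
      simp [pvScanB, List.dropWhile, hne, hk2]

theorem pvAdj_eq : ∀ (n : Nat) (l : List Char), l.length ≤ n → pvAdjA l = pvAdjB l := by
  intro n
  induction n with
  | zero =>
    intro l hl
    have : l = [] := by cases l <;> simp_all
    simp [this, pvAdjA, pvAdjB]
  | succ n ih =>
    intro l hl
    match l with
    | [] => simp [pvAdjA, pvAdjB]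
    | [a] => simp [pvAdjA, pvAdjB, pvScanB]
    | [a, b] =>
      by_cases hab : a = b
      · subst hab; simp [pvAdjA, pvAdjB, pvScanB]
      · have h1 : (a == b) = false := by simp [hab]
        have h2 : (b == a) = false := by simp [Ne.symm hab]
        simp [pvAdjA, pvAdjB, pvScanB, h1, h2]
    | a :: b :: c :: rest =>
      by_cases hab : a = b
      · subst hab
        by_cases hac : a = c
        · subst hac
          -- A side: strip the whole leading run of a's, then recurse
          simp only [pvAdjA, beq_self_eq_true, if_true]
          rw [pvStripA_dropWhile a _ (by simp)]
          -- B side: count up through the run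
          simp only [pvAdjB, pvScanB, beq_self_eq_true, if_true]
          rw [pvScanB_big a rest (1 + 1 + 1) (by norm_num)]
          rw [show List.dropWhile (fun c => c == a) (a :: a :: a :: rest)
                = List.dropWhile (fun c => c == a) rest from by simp [List.dropWhile]]
          cases hdw : rest.dropWhile (fun c => c == a) with
          | nil => rfl
          | cons d r =>
            have hlen : (d :: r).length ≤ rest.length := by
              rw [← hdw]; exact List.length_dropWhile_le _ _
            have := ih (d :: r) (by simp only [List.length_cons] at hl hlen ⊢; omega)
            simp only [pvAdjB] at this
            exact this
        · have hca : (c == a) = false := by simp [Ne.symm hac]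
          have hac' : (a == c) = false := by simp [hac]
          simp [pvAdjA, pvAdjB, pvScanB, hca, hac']
      · have hne : (a == b) = false := by simp [hab]
        have hba : (b == a) = false := by simp [Ne.symm hab]
        have h1 : pvAdjA (a :: b :: c :: rest) = pvAdjA (b :: c :: rest) := by
          simp [pvAdjA, hne]
        have h2 : pvAdjB (a :: b :: c :: rest) = pvAdjB (b :: c :: rest) := by
          simp [pvAdjB, pvScanB, hba, show ((1 : Int) == 2) = false from by decide]
        rw [h1, h2]
        exact ih (b :: c :: rest) (by simp only [List.length_cons] at hl ⊢; omega)

-- ===== VERDICT (by name: the statement is the Claim_ definition above) =====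
theorem adjacent2_spec : Claim_equal_adjacent2 := by
  intro text _
  unfold Spec_adjacent2 adjacent2 adjacent2_alt
  rw [pvAdj_eq text.toList.length text.toList (le_refl _)]
  cases text.toList <;> rfl
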